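-- pv_equiv track=rewrite | github.com/kkk0-000/ADITokenClassification | Adi_preprocess/multi-label.py | build_detail_annotation
-- ===== SOURCE A (Python) =====
-- def build_detail_annotation(query_len, q2r_map, pos_to_region, func_detail_map):
--     """为每个 query 残基生成详细区域/功能注释字符串"""
--     annotations = [""] * query_len
--     for qpos_1 in range(1, query_len + 1):
--         idx = qpos_1 - 1
--         ref_pos = q2r_map.get(qpos_1)
--         if ref_pos is None:
--             continue
--         parts = []
--         if ref_pos in pos_to_region:
--             parts.append(pos_to_region[ref_pos])
--         if ref_pos in func_detail_map:
--             parts.extend(func_detail_map[ref_pos])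
--         annotations[idx] = "|".join(parts)
--     return annotations
-- ===== SOURCE B (Python) =====
-- def build_detail_annotation(query_len, q2r_map, pos_to_region, func_detail_map):
--     """为每个 query 残基生成详细区域/功能注释字符串"""
--     ann = {}
--     for qpos, ref_pos in q2r_map.items():
--         if ref_pos is None:
--             continue
--         region = pos_to_region.get(ref_pos)
--         parts = ([] if region is None else [region]) + func_detail_map.get(ref_pos, [])
--         ann[qpos] = "|".join(parts)
--     return [ann.get(i, "") for i in range(1, query_len + 1)]
-- ===== Notes on version B (the rewrite author's own statement) =====
-- stated objective: alternative
-- what changed: B first builds a sparse qpos->annotation dict by a single pass over q2r_map (option/default lookups instead of membership tests), then emits the result as a comprehension over 1..query_len; A instead mutates a preallocated list in place while scanning every position. Pre_ only excludes association lists with duplicate q2r_map keys, which do not represent a Python dict (A reads the first binding, B's dict overwrite keeps the last).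
import Mathlib
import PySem

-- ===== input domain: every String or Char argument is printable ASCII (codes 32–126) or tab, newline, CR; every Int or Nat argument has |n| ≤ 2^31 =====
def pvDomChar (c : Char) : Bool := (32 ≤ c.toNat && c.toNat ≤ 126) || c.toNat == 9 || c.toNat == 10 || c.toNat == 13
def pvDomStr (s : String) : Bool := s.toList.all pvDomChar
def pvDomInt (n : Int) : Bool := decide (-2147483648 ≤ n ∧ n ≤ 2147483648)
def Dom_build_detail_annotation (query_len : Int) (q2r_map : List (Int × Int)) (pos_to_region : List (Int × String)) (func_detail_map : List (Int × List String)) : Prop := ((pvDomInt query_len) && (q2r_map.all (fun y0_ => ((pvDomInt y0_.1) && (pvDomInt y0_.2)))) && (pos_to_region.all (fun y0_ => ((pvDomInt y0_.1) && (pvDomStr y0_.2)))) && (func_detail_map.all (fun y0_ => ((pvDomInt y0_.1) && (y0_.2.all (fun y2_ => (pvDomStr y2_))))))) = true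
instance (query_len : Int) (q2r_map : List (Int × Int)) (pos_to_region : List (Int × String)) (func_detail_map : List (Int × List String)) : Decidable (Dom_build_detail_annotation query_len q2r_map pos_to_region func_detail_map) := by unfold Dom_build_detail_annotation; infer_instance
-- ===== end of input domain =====

-- B builds a sparse qpos→annotation dict in one pass over q2r_map and then emits the result as
-- a comprehension over 1..query_len; A mutates a preallocated list while scanning every position
-- (alternative decomposition, not claimed faster).

-- ===== PORT A =====
-- A's per-position body: membership tests then append/extend on a mutable parts list
def pvPartsA (pos_to_region : List (Int × String)) (func_detail_map : List (Int × List String)) (ref_pos : Int) : String :=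
  let parts : List String := []
  let parts := match (PySem.Dict.mk pos_to_region).get? ref_pos with
    | some region => parts ++ [region]
    | none => parts
  let parts := match (PySem.Dict.mk func_detail_map).get? ref_pos with
    | some details => parts ++ details
    | none => parts
  PySem.Str.join "|" parts

def build_detail_annotation (query_len : Int) (q2r_map : List (Int × Int)) (pos_to_region : List (Int × String)) (func_detail_map : List (Int × List String)) : List String :=
  (PySem.List.pyRange 1 (query_len + 1) 1).foldl
    (fun annotations qpos_1 =>
      match (PySem.Dict.mk q2r_map).get? qpos_1 with
      | none => annotations
      | some ref_pos => annotations.set (qpos_1 - 1).toNat (pvPartsA pos_to_region func_detail_map ref_pos))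
    (List.replicate query_len.toNat "")

-- ===== PORT B =====
-- B's per-reference annotation: option-to-list of the region lookup, concatenated with the
-- defaulted detail lookup ('pos_to_region.get(ref)' / 'func_detail_map.get(ref, [])')
def pvAnnB (pos_to_region : List (Int × String)) (func_detail_map : List (Int × List String)) (ref_pos : Int) : String :=
  PySem.Str.join "|"
    (((PySem.Dict.mk pos_to_region).get? ref_pos).toList ++
     (PySem.Dict.mk func_detail_map).getD ref_pos [])

def build_detail_annotation_alt (query_len : Int) (q2r_map : List (Int × Int)) (pos_to_region : List (Int × String)) (func_detail_map : List (Int × List String)) : List String :=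
  let ann : PySem.Dict Int String :=
    q2r_map.foldl (fun d qr => d.insert qr.1 (pvAnnB pos_to_region func_detail_map qr.2))
      PySem.Dict.empty
  (PySem.List.pyRange 1 (query_len + 1) 1).map (fun i => ann.getD i "")

-- ===== PRECONDITION & SPEC =====
-- Pre_ excludes association lists whose q2r_map has duplicate keys: those do not represent a
-- Python dict (the argument A and B receive), and on them A reads the first binding while B's
-- dict overwrite keeps the last — a defensible-corner artefact of the dict-as-list encoding.
def Pre_build_detail_annotation (query_len : Int) (q2r_map : List (Int × Int)) (pos_to_region : List (Int × String)) (func_detail_map : List (Int × List String)) : Prop :=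
  (q2r_map.map Prod.fst).Nodup
instance (query_len : Int) (q2r_map : List (Int × Int)) (pos_to_region : List (Int × String)) (func_detail_map : List (Int × List String)) : Decidable (Pre_build_detail_annotation query_len q2r_map pos_to_region func_detail_map) := by unfold Pre_build_detail_annotation; infer_instance

def pvWitness_build_detail_annotation : Int × (List (Int × Int)) × (List (Int × String)) × (List (Int × List String)) :=
  (3, [(1, 5), (3, 7)], [(5, "helix")], [(5, ["binding", "active"]), (7, ["loop"])])

def Spec_build_detail_annotation (query_len : Int) (q2r_map : List (Int × Int)) (pos_to_region : List (Int × String)) (func_detail_map : List (Int × List String)) (out : List String) : Prop := out = build_detail_annotation_alt query_len q2r_map pos_to_region func_detail_map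
instance (query_len : Int) (q2r_map : List (Int × Int)) (pos_to_region : List (Int × String)) (func_detail_map : List (Int × List String)) (out : List String) : Decidable (Spec_build_detail_annotation query_len q2r_map pos_to_region func_detail_map out) := by unfold Spec_build_detail_annotation; infer_instance

-- ===== CLAIM (what is proved, stated in full; the proofs are below) =====
def Claim_equal_build_detail_annotation : Prop := ∀ (query_len : Int) (q2r_map : List (Int × Int)) (pos_to_region : List (Int × String)) (func_detail_map : List (Int × List String)), Dom_build_detail_annotation query_len q2r_map pos_to_region func_detail_map → Pre_build_detail_annotation query_len q2r_map pos_to_region func_detail_map → Spec_build_detail_annotation query_len q2r_map pos_to_region func_detail_map (build_detail_annotation query_len q2r_map pos_to_region func_detail_map)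

-- ===== LEMMAS AND PROOFS =====

-- the two per-reference annotation bodies agree
theorem pvParts_eq_ann (pos_to_region : List (Int × String)) (func_detail_map : List (Int × List String)) (r : Int) :
    pvPartsA pos_to_region func_detail_map r = pvAnnB pos_to_region func_detail_map r := by
  unfold pvPartsA pvAnnB
  cases (PySem.Dict.mk pos_to_region).get? r <;>
    cases hf : (PySem.Dict.mk func_detail_map).get? r <;>
      simp [PySem.Dict.getD_eq_get?_getD, hf]

-- the common value both programs place in cell j
def pvCell (query_len : Int) (q2r_map : List (Int × Int)) (pos_to_region : List (Int × String)) (func_detail_map : List (Int × List String)) (j : Nat) : Option String :=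
  if (j : Int) < query_len then
    some (match (PySem.Dict.mk q2r_map).get? ((j : Int) + 1) with
          | some r => pvAnnB pos_to_region func_detail_map r
          | none => "")
  else none

-- a fold of optional writes: cell j holds the LAST write whose index is j
theorem foldl_optset_getElem? {α : Type} (f : α → Option String) (idx : α → Nat) :
    ∀ (L : List α) (acc : List String) (j : Nat),
      (L.foldl (fun a x => match f x with | none => a | some s => a.set (idx x) s) acc)[j]? =
        match L.reverse.find? (fun x => (f x).isSome && idx x == j) with
        | some x => if j < acc.length then f x else none
        | none => acc[j]? := by
  intro L
  induction L with
  | nil => intro acc j; simp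
  | cons x xs ih =>
    intro acc j
    rw [List.foldl_cons, ih, List.reverse_cons, List.find?_append]
    cases h1 : xs.reverse.find? (fun x => (f x).isSome && idx x == j) with
    | some y =>
      cases hf : f x <;> simp [hf, List.length_set]
    | none =>
      cases hf : f x with
      | none => simp [hf]
      | some s =>
        by_cases hij : idx x = j
        · simp [hf, hij, List.getElem?_set]
        · simp [hf, hij, List.getElem?_set_ne hij]

theorem pvFind?_unique {α : Type} [DecidableEq α] (p : α → Bool) (a : α) :
    ∀ (L : List α), (∀ x ∈ L, p x = true → x = a) →
      L.find? p = if a ∈ L ∧ p a = true then some a else none := by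
  intro L
  induction L with
  | nil => intro _; simp
  | cons x xs ih =>
    intro h
    cases hp : p x with
    | true =>
      have hx : x = a := h x (by simp) hp
      subst hx
      simp [List.find?_cons, hp]
    | false =>
      rw [List.find?_cons, hp]
      rw [ih (fun y hy hpy => h y (by simp [hy]) hpy)]
      by_cases hm : a ∈ xs
      · simp [hm]
      · by_cases hax : a = x
        · subst hax; simp [hm, hp]
        · simp [hm, Ne.symm hax, hax]

-- the dict B builds reads back, under unique keys, as the first-match lookup of the list
theorem pvFoldl_insert_get? (g : Int → String) (i : Int) :
    ∀ (L : List (Int × Int)) (d : PySem.Dict Int String), (L.map Prod.fst).Nodup →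
      (L.foldl (fun d qr => d.insert qr.1 (g qr.2)) d).get? i =
        match L.find? (fun qr => qr.1 == i) with
        | some qr => some (g qr.2)
        | none => d.get? i := by
  intro L
  induction L with
  | nil => intro d _; simp
  | cons x xs ih =>
    intro d hnd
    rw [List.map_cons, List.nodup_cons] at hnd
    rw [List.foldl_cons, ih _ hnd.2, List.find?_cons]
    by_cases hx : x.1 = i
    · have hxb : (x.1 == i) = true := by simp [hx]
      cases hf : xs.find? (fun qr => qr.1 == i) with
      | some y =>
        exfalso
        have hy : y.1 = i := by simpa using List.find?_some hf
        have hmem : x.1 ∈ xs.map Prod.fst := by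
          rw [hx, ← hy]; exact List.mem_map_of_mem (List.mem_of_find?_eq_some hf)
        exact hnd.1 hmem
      | none => simp [hf, hxb, hx, PySem.Dict.get?_insert_self]
    · have hxb : (x.1 == i) = false := by simp [hx]
      cases hf : xs.find? (fun qr => qr.1 == i) with
      | some y => simp [hf, hxb]
      | none => simp [hf, hxb, PySem.Dict.get?_insert_of_ne _ _ (fun h => hx h.symm)]

theorem pvA_get (query_len : Int) (q2r_map : List (Int × Int)) (pos_to_region : List (Int × String)) (func_detail_map : List (Int × List String)) (j : Nat) :
    (build_detail_annotation query_len q2r_map pos_to_region func_detail_map)[j]? =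
      pvCell query_len q2r_map pos_to_region func_detail_map j := by
  have hfun : (fun (annotations : List String) (qpos_1 : Int) =>
      match (PySem.Dict.mk q2r_map).get? qpos_1 with
      | none => annotations
      | some ref_pos => annotations.set (qpos_1 - 1).toNat (pvPartsA pos_to_region func_detail_map ref_pos))
      = (fun a x => match ((PySem.Dict.mk q2r_map).get? x).map (pvPartsA pos_to_region func_detail_map) with
          | none => a
          | some s => a.set ((x - 1).toNat) s) := by
    funext a x
    cases hx : (PySem.Dict.mk q2r_map).get? x <;> simp [hx]
  rw [build_detail_annotation, hfun,
    foldl_optset_getElem? (fun x : Int => ((PySem.Dict.mk q2r_map).get? x).map (pvPartsA pos_to_region func_detail_map)) (fun x : Int => (x - 1).toNat)]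
  have hprf : ∀ q ∈ (PySem.List.pyRange 1 (query_len + 1) 1).reverse,
      ((((PySem.Dict.mk q2r_map).get? q).map (pvPartsA pos_to_region func_detail_map)).isSome
        && ((q - 1).toNat == j)) = true → q = (j : Int) + 1 := by
    intro q hq hpq
    simp only [Bool.and_eq_true, beq_iff_eq] at hpq
    have hq' : q ∈ PySem.List.pyRange 1 (query_len + 1) 1 := by simpa using hq
    have h1 : 1 ≤ q := (PySem.List.mem_pyRange_one.1 hq').1
    omega
  rw [pvFind?_unique (fun q : Int => ((((PySem.Dict.mk q2r_map).get? q).map (pvPartsA pos_to_region func_detail_map)).isSome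
        && ((q - 1).toNat == j))) ((j : Int) + 1) ((PySem.List.pyRange 1 (query_len + 1) 1).reverse) hprf]
  by_cases hj : (j : Int) < query_len
  · have hmem : ((j : Int) + 1) ∈ (PySem.List.pyRange 1 (query_len + 1) 1).reverse := by
      simp [PySem.List.mem_pyRange_one]; omega
    cases hg : (PySem.Dict.mk q2r_map).get? ((j : Int) + 1) with
    | some r =>
      rw [if_pos ⟨hmem, by simp [hg]⟩]
      have hjl : j < (List.replicate query_len.toNat ("" : String)).length := by
        simp; omega
      simp [hjl, hg, pvCell, hj, pvParts_eq_ann]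
    | none =>
      rw [if_neg (by simp [hg])]
      have hjl : j < query_len.toNat := by omega
      simp [hjl, pvCell, hj, hg]
  · rw [if_neg (by
      rintro ⟨hmem, -⟩
      rw [List.mem_reverse, PySem.List.mem_pyRange_one] at hmem
      omega)]
    have hjl : ¬ j < query_len.toNat := by omega
    simp [hjl, pvCell, hj]

theorem pvB_get (query_len : Int) (q2r_map : List (Int × Int)) (pos_to_region : List (Int × String)) (func_detail_map : List (Int × List String))
    (hpre : (q2r_map.map Prod.fst).Nodup) (j : Nat) :
    (build_detail_annotation_alt query_len q2r_map pos_to_region func_detail_map)[j]? =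
      pvCell query_len q2r_map pos_to_region func_detail_map j := by
  rw [build_detail_annotation_alt]
  rw [List.getElem?_map, PySem.List.getElem?_pyRange_one]
  have hget : (PySem.Dict.mk q2r_map).get? ((j : Int) + 1)
      = (q2r_map.find? (fun x => x.1 == (j : Int) + 1)).map Prod.snd := rfl
  by_cases hj : (j : Int) < query_len
  · have hjl : j < (query_len + 1 - 1).toNat := by omega
    rw [if_pos hjl]
    simp only [Option.map_some]
    rw [PySem.Dict.getD_eq_get?_getD, pvFoldl_insert_get? _ _ _ _ hpre]
    have h1j : (1 : Int) + (j : Int) = (j : Int) + 1 := by omega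
    rw [h1j]
    cases hf : q2r_map.find? (fun x => x.1 == (j : Int) + 1) with
    | some pr => simp [pvCell, hj, hget, hf]
    | none => simp [pvCell, hj, hget, hf, PySem.Dict.get?_empty]
  · have hjl : ¬ j < (query_len + 1 - 1).toNat := by omega
    rw [if_neg hjl]
    simp [pvCell, hj]

-- ===== VERDICT (by name: the statement is the Claim_ definition above) =====
theorem build_detail_annotation_spec : Claim_equal_build_detail_annotation := by
  intro query_len q2r_map pos_to_region func_detail_map _ hpre
  unfold Spec_build_detail_annotation
  apply List.ext_getElem?
  intro j
  rw [pvA_get, pvB_get query_len q2r_map pos_to_region func_detail_map hpre]
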